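-- pv_equiv track=rewrite | github.com/ShivenA99/IntegrityShield | legacy font attack latex/backend/manipulators/truly_selective_v3.py | _build_calt_feature
-- ===== SOURCE A (Python) =====
-- def _build_calt_feature(hidden_word, visual_word, cmap, alternate_glyphs, log_entries):
--     """Build OpenType calt feature code for contextual substitution."""
--
--     # Build context-sensitive substitution rules
--     # We need to substitute based on position in the specific sequence
--
--     fea_lines = [
--         "languagesystem DFLT dflt;",
--         "languagesystem latn dflt;",
--         "",
--         "feature calt {",
--     ]
--
--     # Build a lookup for the entire word context
--     # For each position, if we have an alternate, create a contextual rule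
--
--     for pos, (hidden_char, visual_char) in enumerate(zip(hidden_word, visual_word)):
--         if (hidden_char, pos) in alternate_glyphs:
--             hidden_glyph = cmap[ord(hidden_char)]
--             alt_glyph = alternate_glyphs[(hidden_char, pos)]
--
--             # Build context: what comes before and after
--             context_before = []
--             context_after = []
--
--             for i in range(pos):
--                 ctx_char = hidden_word[i]
--                 ctx_glyph = cmap[ord(ctx_char)]
--                 # Check if this position has an alternate
--                 if (ctx_char, i) in alternate_glyphs:
--                     ctx_glyph = alternate_glyphs[(ctx_char, i)]
--                 context_before.append(ctx_glyph)
--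
--             for i in range(pos + 1, len(hidden_word)):
--                 ctx_char = hidden_word[i]
--                 ctx_glyph = cmap[ord(ctx_char)]
--                 context_after.append(ctx_glyph)
--
--             # Build the substitution rule
--             rule_parts = []
--             if context_before:
--                 rule_parts.append(' '.join(context_before))
--             rule_parts.append(f"{hidden_glyph}' by {alt_glyph}")
--             if context_after:
--                 rule_parts.append(' '.join(context_after))
--
--             rule = "  sub " + ' '.join(rule_parts) + ";"
--             fea_lines.append(rule)
--             log_entries.append(f"  CALT rule: {rule}")
--
--     fea_lines.append("} calt;")
--     fea_lines.append("")
--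
--     fea_code = '\n'.join(fea_lines)
--     log_entries.append(f"Generated feature code:\n{fea_code}")
--
--     return fea_code
-- ===== SOURCE B (Python) =====
-- def _build_calt_feature(hidden_word, visual_word, cmap, alternate_glyphs, log_entries):
--     """Build OpenType calt feature code for contextual substitution."""
--     header = [
--         "languagesystem DFLT dflt;",
--         "languagesystem latn dflt;",
--         "",
--         "feature calt {",
--     ]
--     n = len(hidden_word)
--     matched = [p for p in range(min(n, len(visual_word)))
--                if (hidden_word[p], p) in alternate_glyphs]
--     rules = []
--     if matched:
--         # glyph tables, built once: plain cmap glyphs and effective (alternate-aware) glyphs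
--         plain = [cmap[ord(c)] for c in hidden_word]
--         eff = [alternate_glyphs.get((c, j), plain[j]) for j, c in enumerate(hidden_word)]
--         for p in matched:
--             parts = []
--             if p > 0:
--                 parts.append(' '.join(eff[:p]))
--             parts.append(f"{plain[p]}' by {alternate_glyphs[(hidden_word[p], p)]}")
--             if p + 1 < n:
--                 parts.append(' '.join(plain[p+1:]))
--             rules.append("  sub " + ' '.join(parts) + ";")
--     for rule in rules:
--         log_entries.append(f"  CALT rule: {rule}")
--     fea_code = '\n'.join(header + rules + ["} calt;", ""])
--     log_entries.append(f"Generated feature code:\n{fea_code}")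
--     return fea_code
-- ===== Notes on version B (the rewrite author's own statement) =====
-- stated objective: alternative
-- what changed: A rebuilds the before/after context with two fresh loops (each doing cmap and alternate-glyph lookups) for every matched position; B first collects the matched positions, builds the plain and effective glyph tables once, and forms each rule by slicing those tables.
import Mathlib
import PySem

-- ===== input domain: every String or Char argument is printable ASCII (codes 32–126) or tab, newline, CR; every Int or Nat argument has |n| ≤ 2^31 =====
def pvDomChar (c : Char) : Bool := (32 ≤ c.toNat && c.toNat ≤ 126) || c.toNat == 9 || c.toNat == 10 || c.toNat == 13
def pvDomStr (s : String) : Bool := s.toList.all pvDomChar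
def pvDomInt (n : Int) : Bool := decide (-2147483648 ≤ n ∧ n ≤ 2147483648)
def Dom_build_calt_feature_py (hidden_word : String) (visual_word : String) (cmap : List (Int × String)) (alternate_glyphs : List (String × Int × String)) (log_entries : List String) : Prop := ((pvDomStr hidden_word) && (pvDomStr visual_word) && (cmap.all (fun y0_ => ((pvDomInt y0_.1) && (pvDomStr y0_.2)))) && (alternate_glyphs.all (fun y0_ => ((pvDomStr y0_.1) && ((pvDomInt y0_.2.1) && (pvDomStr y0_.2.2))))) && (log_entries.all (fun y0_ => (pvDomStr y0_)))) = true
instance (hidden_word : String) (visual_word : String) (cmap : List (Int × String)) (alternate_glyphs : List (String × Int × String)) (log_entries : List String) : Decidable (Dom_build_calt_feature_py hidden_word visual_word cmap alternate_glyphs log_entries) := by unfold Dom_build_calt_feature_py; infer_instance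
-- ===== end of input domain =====

-- ===== PORT A =====
-- B changes the decomposition: A recomputes both context loops per matched position; B precomputes the
-- plain and effective glyph tables once and slices them per rule.  Equivalence is about the RETURN value;
-- both Pythons also append the same entries to log_entries (in-place list mutation, not modelled here).

-- dict primitives used by both ports: alternate_glyphs[(c, i)] lookup and cmap[ord(c)] (total form; Pre_ excludes KeyError)
def pvAgGet? (ag : List (String × Int × String)) (c : Char) (i : Int) : Option String :=
  (ag.find? (fun t => t.1 == String.mk [c] && t.2.1 == i)).map (·.2.2)
def pvCmapGet (cmap : List (Int × String)) (c : Char) : String :=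
  ((cmap.find? (fun pr => pr.1 == (c.toNat : Int))).map (·.2)).getD ""
def pvRuleA (hl : List Char) (cmap : List (Int × String)) (ag : List (String × Int × String)) (pos : Int) : String :=
  let hidden_char := PySem.List.pyGetD hl pos ' '
  let hidden_glyph := pvCmapGet cmap hidden_char
  let alt_glyph := (pvAgGet? ag hidden_char pos).getD ""
  let context_before := (PySem.List.pyRange 0 pos 1).foldl (fun acc i =>
    let ctx_char := PySem.List.pyGetD hl i ' '
    let ctx_glyph := pvCmapGet cmap ctx_char
    let ctx_glyph := if (pvAgGet? ag ctx_char i).isSome then (pvAgGet? ag ctx_char i).getD "" else ctx_glyph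
    acc ++ [ctx_glyph]) []
  let context_after := (PySem.List.pyRange (pos + 1) (PySem.List.len hl) 1).foldl (fun acc i =>
    let ctx_char := PySem.List.pyGetD hl i ' '
    acc ++ [pvCmapGet cmap ctx_char]) []
  let rule_parts : List String := if context_before.isEmpty then [] else [PySem.Str.join " " context_before]
  let rule_parts := rule_parts ++ [hidden_glyph ++ "' by " ++ alt_glyph]
  let rule_parts := if context_after.isEmpty then rule_parts else rule_parts ++ [PySem.Str.join " " context_after]
  "  sub " ++ PySem.Str.join " " rule_parts ++ ";"
def build_calt_feature_py (hidden_word : String) (visual_word : String) (cmap : List (Int × String)) (alternate_glyphs : List (String × Int × String)) (log_entries : List String) : String :=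
  let hl := hidden_word.toList
  let fea_lines : List String :=
    ["languagesystem DFLT dflt;", "languagesystem latn dflt;", "", "feature calt {"]
  let fea_lines := (PySem.List.enumerate (List.zip hl visual_word.toList) 0).foldl
    (fun fea pr =>
      if (pvAgGet? alternate_glyphs pr.2.1 pr.1).isSome then
        fea ++ [pvRuleA hl cmap alternate_glyphs pr.1]
      else fea) fea_lines
  let fea_lines := fea_lines ++ ["} calt;"]
  let fea_lines := fea_lines ++ [""]
  PySem.Str.join "\n" fea_lines


-- ===== PORT B =====
def pvRuleB (plain eff : List String) (ag : List (String × Int × String)) (hl : List Char) (n : Nat) (p : Nat) : String :=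
  let parts : List String :=
    (if 0 < p then [PySem.Str.join " " (eff.take p)] else [])
    ++ [plain.getD p "" ++ "' by " ++ (pvAgGet? ag (hl.getD p ' ') p).getD ""]
    ++ (if p + 1 < n then [PySem.Str.join " " (plain.drop (p + 1))] else [])
  "  sub " ++ PySem.Str.join " " parts ++ ";"

def build_calt_feature_py_alt (hidden_word : String) (visual_word : String) (cmap : List (Int × String)) (alternate_glyphs : List (String × Int × String)) (log_entries : List String) : String :=
  let hl := hidden_word.toList
  let n := hl.length
  let header : List String :=
    ["languagesystem DFLT dflt;", "languagesystem latn dflt;", "", "feature calt {"]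
  let matched := (List.range (min n visual_word.toList.length)).filter
    (fun p => (pvAgGet? alternate_glyphs (hl.getD p ' ') p).isSome)
  let rules : List String :=
    if matched.isEmpty then []
    else
      let plain := hl.map (fun c => pvCmapGet cmap c)
      let eff := (List.range n).map (fun j => (pvAgGet? alternate_glyphs (hl.getD j ' ') j).getD (plain.getD j ""))
      matched.map (fun p => pvRuleB plain eff alternate_glyphs hl n p)
  PySem.Str.join "\n" (header ++ rules ++ ["} calt;", ""])


-- ===== PRECONDITION & SPEC =====
-- Pre_ excludes exactly the KeyError inputs: if some position of hidden_word (within the zip with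
-- visual_word) is a key of alternate_glyphs, A looks up cmap[ord(c)] for every character of
-- hidden_word and raises KeyError on a missing entry; otherwise no lookup happens and A is total.
def Pre_build_calt_feature_py (hidden_word : String) (visual_word : String) (cmap : List (Int × String)) (alternate_glyphs : List (String × Int × String)) (log_entries : List String) : Prop :=
  ((List.range (min hidden_word.toList.length visual_word.toList.length)).any
      (fun p => (pvAgGet? alternate_glyphs (hidden_word.toList.getD p ' ') p).isSome)) = true →
    (hidden_word.toList.all (fun c => (cmap.find? (fun pr => pr.1 == (c.toNat : Int))).isSome)) = true
instance (hidden_word : String) (visual_word : String) (cmap : List (Int × String)) (alternate_glyphs : List (String × Int × String)) (log_entries : List String) : Decidable (Pre_build_calt_feature_py hidden_word visual_word cmap alternate_glyphs log_entries) := by unfold Pre_build_calt_feature_py; infer_instance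

def pvWitness_build_calt_feature_py : String × String × (List (Int × String)) × (List (String × Int × String)) × List String :=
  ("ab", "xy", [((97 : Int), "a.g"), ((98 : Int), "b.g")], [("a", (0 : Int), "a.alt")], [])

def Spec_build_calt_feature_py (hidden_word : String) (visual_word : String) (cmap : List (Int × String)) (alternate_glyphs : List (String × Int × String)) (log_entries : List String) (out : String) : Prop := out = build_calt_feature_py_alt hidden_word visual_word cmap alternate_glyphs log_entries
instance (hidden_word : String) (visual_word : String) (cmap : List (Int × String)) (alternate_glyphs : List (String × Int × String)) (log_entries : List String) (out : String) : Decidable (Spec_build_calt_feature_py hidden_word visual_word cmap alternate_glyphs log_entries out) := by unfold Spec_build_calt_feature_py; infer_instance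

-- ===== CLAIM (what is proved, stated in full; the proofs are below) =====
def Claim_equal_build_calt_feature_py : Prop := ∀ (hidden_word : String) (visual_word : String) (cmap : List (Int × String)) (alternate_glyphs : List (String × Int × String)) (log_entries : List String), Dom_build_calt_feature_py hidden_word visual_word cmap alternate_glyphs log_entries → Pre_build_calt_feature_py hidden_word visual_word cmap alternate_glyphs log_entries → Spec_build_calt_feature_py hidden_word visual_word cmap alternate_glyphs log_entries (build_calt_feature_py hidden_word visual_word cmap alternate_glyphs log_entries)

-- ===== LEMMAS AND PROOFS =====
theorem pvRule_eq (hl : List Char) (cmap : List (Int × String)) (ag : List (String × Int × String))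
    (k : Nat) (hk : k < hl.length) :
    pvRuleA hl cmap ag (k : Int) =
      pvRuleB (hl.map (fun c => pvCmapGet cmap c))
        ((List.range hl.length).map (fun j => (pvAgGet? ag (hl.getD j ' ') j).getD ((hl.map (fun c => pvCmapGet cmap c)).getD j "")))
        ag hl hl.length k := by
  have hcast : ((k : Int) + 1) = (((k+1 : Nat)) : Int) := by push_cast; ring
  have hafter : (PySem.List.pyRange ((k : Int) + 1) (PySem.List.len hl) 1).map
      (fun i => pvCmapGet cmap (PySem.List.pyGetD hl i ' '))
      = (hl.drop (k+1)).map (fun c => pvCmapGet cmap c) := by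
    rw [show (fun i => pvCmapGet cmap (PySem.List.pyGetD hl i ' ')) =
        (fun c => pvCmapGet cmap c) ∘ (fun i => PySem.List.pyGetD hl i ' ') from rfl,
      ← List.map_map, PySem.List.map_pyGetD_pyRange (xs := hl) (d := ' ') (a := (k : Int) + 1) (by positivity),
      hcast, Int.toNat_natCast]
  have hplaingetD : ∀ j, j < hl.length → (hl.map (fun c => pvCmapGet cmap c)).getD j "" = pvCmapGet cmap (hl.getD j ' ') := by
    intro j hj
    rw [List.getD_eq_getElem _ _ (by simpa using hj), List.getElem_map, List.getD_eq_getElem _ _ hj]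
  have hbefore : (List.range k).map
      (fun (x : Nat) =>
        if (pvAgGet? ag (hl.getD x ' ') (x : Int)).isSome = true then (pvAgGet? ag (hl.getD x ' ') (x : Int)).getD ""
        else pvCmapGet cmap (hl.getD x ' '))
      = (((List.range hl.length).map (fun j => (pvAgGet? ag (hl.getD j ' ') j).getD ((hl.map (fun c => pvCmapGet cmap c)).getD j ""))).take k) := by
    rw [← List.map_take, List.take_range, Nat.min_eq_left (le_of_lt hk)]
    refine List.map_congr_left ?_
    intro i hi
    have hik : i < k := List.mem_range.mp hi
    rw [hplaingetD i (lt_trans hik hk)]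
    cases h : pvAgGet? ag (hl.getD i ' ') i <;> simp [h]
  simp only [pvRuleA, pvRuleB, PySem.List.foldl_append_singleton_eq_map,
    PySem.List.pyRange_zero_nat, List.map_map, Function.comp_def, PySem.List.pyGetD_natCast,
    List.nil_append, hafter]
  have hc1 : ((List.map (fun c => pvCmapGet cmap c) (List.drop (k+1) hl))).isEmpty
      = !(decide (k + 1 < hl.length)) := by
    rcases Nat.lt_or_ge (k+1) hl.length with h | h
    · have hne : List.drop (k+1) hl ≠ [] := by simp only [ne_eq, List.drop_eq_nil_iff]; omega
      simp [h, List.isEmpty_iff, List.map_eq_nil_iff, hne]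
    · have he : List.drop (k+1) hl = [] := by simp only [List.drop_eq_nil_iff]; omega
      simp [he, Nat.not_lt.mpr h]
  have hc2 : ((((List.range hl.length).map (fun j => (pvAgGet? ag (hl.getD j ' ') j).getD ((hl.map (fun c => pvCmapGet cmap c)).getD j ""))).take k)).isEmpty
      = !(decide (0 < k)) := by
    rcases Nat.eq_zero_or_pos k with h | h
    · simp [h]
    · have hne : (((List.range hl.length).map (fun j => (pvAgGet? ag (hl.getD j ' ') j).getD ((hl.map (fun c => pvCmapGet cmap c)).getD j ""))).take k) ≠ [] := by
        simp only [ne_eq, List.take_eq_nil_iff, List.map_eq_nil_iff, List.range_eq_nil]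
        omega
      simp [h, hne]
      exact ⟨by omega, by rintro rfl; simp at hk⟩
  rw [hbefore, hplaingetD k hk, hc1, hc2]
  by_cases h0 : 0 < k <;> by_cases h1 : k + 1 < hl.length <;> simp [h0, h1]

theorem main_eq (hidden_word visual_word : String) (cmap : List (Int × String)) (ag : List (String × Int × String)) (log : List String) :
    build_calt_feature_py hidden_word visual_word cmap ag log = build_calt_feature_py_alt hidden_word visual_word cmap ag log := by
  simp only [build_calt_feature_py, build_calt_feature_py_alt]
  set hl := hidden_word.toList with hhl
  set vl := visual_word.toList with hvl
  set m := min hl.length vl.length with hm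
  -- A's loop as filter+map over positions
  rw [PySem.List.enumerate_eq_map_pyRange (List.zip hl vl) (' ', ' '), PySem.List.foldl_append_if]
  simp only [List.filter_map, List.map_map, PySem.List.len_eq, List.length_zip,
    PySem.List.pyRange_zero_nat, List.filter_map, List.map_map, Function.comp_def,
    PySem.List.pyGetD_natCast, ← hm]
  have hfil : (List.range m).filter (fun x => (pvAgGet? ag ((hl.zip vl).getD x (' ', ' ')).1 (x : Int)).isSome)
      = (List.range m).filter (fun p => (pvAgGet? ag (hl.getD p ' ') (p : Int)).isSome) := by
    refine List.filter_congr ?_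
    intro x hx
    have hxm : x < m := List.mem_range.mp hx
    have h1 : x < hl.length := lt_of_lt_of_le hxm (by omega)
    have h2 : x < (hl.zip vl).length := by rw [List.length_zip]; omega
    rw [List.getD_eq_getElem _ _ h2, List.getD_eq_getElem _ _ h1, List.getElem_zip]
  rw [hfil]
  rcases hE : ((List.range m).filter (fun p => (pvAgGet? ag (hl.getD p ' ') (p : Int)).isSome)).isEmpty with _ | _
  · -- nonempty branch
    simp only [Bool.false_eq_true, if_false]
    have hmap : ((List.range m).filter (fun p => (pvAgGet? ag (hl.getD p ' ') (p : Int)).isSome)).map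
        (fun (x : Nat) => pvRuleA hl cmap ag (x : Int))
        = ((List.range m).filter (fun p => (pvAgGet? ag (hl.getD p ' ') (p : Int)).isSome)).map
          (fun p => pvRuleB (hl.map (fun c => pvCmapGet cmap c))
            ((List.range hl.length).map (fun j => (pvAgGet? ag (hl.getD j ' ') j).getD ((hl.map (fun c => pvCmapGet cmap c)).getD j "")))
            ag hl hl.length p) := by
      refine List.map_congr_left ?_
      intro p hp
      have hpm : p < m := List.mem_range.mp (List.mem_of_mem_filter hp)
      exact pvRule_eq hl cmap ag p (lt_of_lt_of_le hpm (by omega))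
    rw [hmap]
    simp [List.append_assoc]
  · -- empty branch
    simp only [if_true]
    rw [List.isEmpty_iff.mp hE]
    simp

-- ===== VERDICT (by name: the statement is the Claim_ definition above) =====
theorem build_calt_feature_py_spec : Claim_equal_build_calt_feature_py := by
  intro hidden_word visual_word cmap alternate_glyphs log_entries _hDom _hPre
  unfold Spec_build_calt_feature_py
  exact main_eq hidden_word visual_word cmap alternate_glyphs log_entries
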